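-- pv_equiv track=rewrite | github.com/husjon/advent_of_code | 2022/01/puzzle.py | solve
-- ===== SOURCE A (Python) =====
-- def solve(input_content:str):
--     lines = input_content.split('\n')
--
--     elves = []
--     calories = 0
--
--     for line in lines:
--         if line == '':
--             calories = 0
--             continue
--
--         calorie = int(line)
--         calories += calorie
--         elves.append(calories)
--
--     largest = max(elves)
--
--     top_3 = sorted(elves, reverse=True)[:3]
--
--     return {
--         'largest': largest,
--         'top_3_total': sum(top_3),
--     }
-- ===== SOURCE B (Python) =====
-- def solve(input_content: str):
--     # Single pass: stream the running totals, keeping only the 3 largest seen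
--     # in a small descending list `top3` instead of building the full list and sorting.
--     top3 = []
--     calories = 0
--     for line in input_content.split('\n'):
--         if line == '':
--             calories = 0
--             continue
--         calories += int(line)
--         i = 0
--         while i < len(top3) and top3[i] >= calories:
--             i += 1
--         top3.insert(i, calories)
--         if len(top3) > 3:
--             top3.pop()
--     return {
--         'largest': top3[0],
--         'top_3_total': sum(top3),
--     }
-- ===== Notes on version B (the rewrite author's own statement) =====
-- stated objective: alternative
-- what changed: B replaces A's build-the-full-list-of-running-totals, sort-descending and slice strategy with a single streaming pass that maintains only the 3 largest running totals in a small descending list (insert, pop when longer than 3) and reads the maximum off its head; Pre_ excludes inputs where A raises (a non-integer nonempty line, or no nonempty line so max([]) raises).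
import Mathlib
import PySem

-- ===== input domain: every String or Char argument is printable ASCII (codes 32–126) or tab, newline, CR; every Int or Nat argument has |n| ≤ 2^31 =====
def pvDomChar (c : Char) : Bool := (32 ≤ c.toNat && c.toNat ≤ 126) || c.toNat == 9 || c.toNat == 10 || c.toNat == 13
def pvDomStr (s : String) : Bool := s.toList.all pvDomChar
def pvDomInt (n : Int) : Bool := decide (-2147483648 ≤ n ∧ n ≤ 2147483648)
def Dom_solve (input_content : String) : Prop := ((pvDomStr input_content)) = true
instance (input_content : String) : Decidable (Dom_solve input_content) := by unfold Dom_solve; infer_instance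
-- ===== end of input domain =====

-- B replaces A's build-all-partial-sums / sort / slice strategy with one streaming pass
-- that keeps only the 3 largest running totals; equivalence is about the return value.

-- ===== PORT A =====
-- A: collect every running total in `elves`, then max / sorted(reverse=True)[:3].
-- `.getD 0` stands where Python raises (int(line) ValueError, max([])); Pre_solve excludes those inputs.
def solve (input_content : String) : List (String × Int) :=
  let lines := (PySem.Str.split? input_content "\n").getD []
  let st := lines.foldl (fun (s : List Int × Int) line =>
      if line = "" then (s.1, 0)
      else
        let calories := s.2 + (PySem.Int.ofStr? line).getD 0
        (s.1 ++ [calories], calories)) ([], 0)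
  let elves := st.1
  let largest := (PySem.List.max? elves (fun x => x)).getD 0
  let top_3 := PySem.List.slice (PySem.List.sorted elves (fun x => x) true) none (some 3)
  [("largest", largest), ("top_3_total", top_3.sum)]

-- ===== PORT B =====
-- insertion into the descending list `top3` (B's while/insert loop)
def insDesc (x : Int) : List Int → List Int
  | [] => [x]
  | a :: t => if a ≥ x then a :: insDesc x t else x :: a :: t

-- B: stream the running totals, keeping only the 3 largest in a descending list
-- (`insert` then `pop` when longer than 3 = insert then take 3); largest = top3[0].
-- On all-empty input B's top3[0] raises IndexError; the port returns [] there, outside Pre_solve.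
def solve_alt (input_content : String) : List (String × Int) :=
  let lines := (PySem.Str.split? input_content "\n").getD []
  let st := lines.foldl (fun (s : List Int × Int) line =>
      if line = "" then (s.1, 0)
      else
        let calories := s.2 + (PySem.Int.ofStr? line).getD 0
        (List.take 3 (insDesc calories s.1), calories)) ([], 0)
  match st.1 with
  | [] => []
  | m :: t => [("largest", m), ("top_3_total", (m :: t).sum)]

-- ===== PRECONDITION & SPEC =====
-- Pre_solve: exactly where Python A returns — every line is empty or a valid int literal
-- (else int(line) raises ValueError) and at least one line is nonempty (else max([]) raises).
def Pre_solve (input_content : String) : Prop :=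
  (∀ line ∈ (PySem.Str.split? input_content "\n").getD [],
      line = "" ∨ (PySem.Int.ofStr? line).isSome = true) ∧
  (∃ line ∈ (PySem.Str.split? input_content "\n").getD [], line ≠ "")
instance (input_content : String) : Decidable (Pre_solve input_content) := by unfold Pre_solve; infer_instance

def pvWitness_solve : String := "1\n2\n\n3"

def Spec_solve (input_content : String) (out : List (String × Int)) : Prop := out = solve_alt input_content
instance (input_content : String) (out : List (String × Int)) : Decidable (Spec_solve input_content out) := by unfold Spec_solve; infer_instance

-- ===== CLAIM (what is proved, stated in full; the proofs are below) =====
def Claim_equal_solve : Prop := ∀ (input_content : String), Dom_solve input_content → Pre_solve input_content → Spec_solve input_content (solve input_content)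

-- ===== LEMMAS AND PROOFS =====

-- the stream of running totals both loops walk over
def psums : List String → Int → List Int
  | [], _ => []
  | l :: ls, c =>
      if l = "" then psums ls 0
      else
        let c' := c + (PySem.Int.ofStr? l).getD 0
        c' :: psums ls c'

theorem psums_ne_nil (ls : List String) (c : Int)
    (h : ∃ l ∈ ls, l ≠ "") : psums ls c ≠ [] := by
  induction ls generalizing c with
  | nil => simp at h
  | cons a t ih =>
      rcases h with ⟨l, hl, hne⟩
      simp at hl
      by_cases ha : a = ""
      · rcases hl with rfl | hl
        · exact absurd ha hne
        · simpa [psums, ha] using ih 0 ⟨l, hl, hne⟩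
      · simp [psums, ha]

-- A's loop accumulates exactly the psums stream
theorem foldA (ls : List String) (e : List Int) (c : Int) :
    (ls.foldl (fun (s : List Int × Int) line =>
      if line = "" then (s.1, 0)
      else
        let calories := s.2 + (PySem.Int.ofStr? line).getD 0
        (s.1 ++ [calories], calories)) (e, c)).1 = e ++ psums ls c := by
  induction ls generalizing e c with
  | nil => simp [psums]
  | cons a t ih =>
      by_cases ha : a = "" <;>
        simp [psums, ha, ih]

-- B's loop folds take-3-insert over the same stream
theorem foldB (ls : List String) (h : List Int) (c : Int) :
    (ls.foldl (fun (s : List Int × Int) line =>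
      if line = "" then (s.1, 0)
      else
        let calories := s.2 + (PySem.Int.ofStr? line).getD 0
        (List.take 3 (insDesc calories s.1), calories)) (h, c)).1
    = (psums ls c).foldl (fun acc x => List.take 3 (insDesc x acc)) h := by
  induction ls generalizing h c with
  | nil => simp [psums]
  | cons a t ih =>
      by_cases ha : a = "" <;>
        simp [psums, ha, ih]

-- the key bound-state lemma: inserting into the kept top-3 = inserting into everything, then keeping 3
theorem take3_insDesc (x : Int) (s : List Int) :
    List.take 3 (insDesc x (List.take 3 s)) = List.take 3 (insDesc x s) := by
  rcases s with _ | ⟨a, _ | ⟨b, _ | ⟨c, t⟩⟩⟩ <;>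
    simp [insDesc] <;> split_ifs <;> simp

def isortDesc (vs : List Int) : List Int :=
  vs.foldl (fun acc x => insDesc x acc) []

theorem foldl_take3_eq (vs : List Int) (s : List Int) :
    vs.foldl (fun acc x => List.take 3 (insDesc x acc)) (List.take 3 s)
      = List.take 3 (vs.foldl (fun acc x => insDesc x acc) s) := by
  induction vs generalizing s with
  | nil => rfl
  | cons v t ih =>
      simp only [List.foldl_cons, take3_insDesc]
      exact ih (insDesc v s)

theorem insDesc_perm (x : Int) (s : List Int) : (insDesc x s).Perm (x :: s) := by
  induction s with
  | nil => rfl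
  | cons a t ih =>
      by_cases h : a ≥ x
      · simpa [insDesc, h] using ((ih.cons a).trans (List.Perm.swap x a t))
      · simp [insDesc, h]

theorem insDesc_pairwise (x : Int) (s : List Int)
    (hs : s.Pairwise (· ≥ ·)) : (insDesc x s).Pairwise (· ≥ ·) := by
  induction s with
  | nil => simp [insDesc]
  | cons a t ih =>
      rcases List.pairwise_cons.mp hs with ⟨ha, ht⟩
      by_cases h : a ≥ x
      · rw [insDesc, if_pos h]
        refine List.pairwise_cons.mpr ⟨?_, ih ht⟩
        intro y hy
        rcases List.mem_cons.mp ((insDesc_perm x t).mem_iff.mp hy) with rfl | hy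
        · exact h
        · exact ha y hy
      · rw [insDesc, if_neg h]
        refine List.pairwise_cons.mpr ⟨?_, hs⟩
        intro y hy
        rcases List.mem_cons.mp hy with rfl | hy
        · omega
        · exact le_trans (ha y hy) (by omega)

theorem foldl_insDesc_perm (vs : List Int) (s : List Int) :
    (vs.foldl (fun acc x => insDesc x acc) s).Perm (vs ++ s) := by
  induction vs generalizing s with
  | nil => simp
  | cons v t ih =>
      have h1 : (t.foldl (fun acc x => insDesc x acc) (insDesc v s)).Perm (t ++ insDesc v s) := ih _
      have h2 : (t ++ insDesc v s).Perm (t ++ v :: s) := List.Perm.append_left t (insDesc_perm v s)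
      have h3 : (t ++ v :: s).Perm ((v :: t) ++ s) := by
        simp [List.perm_middle (a := v) (l₁ := t) (l₂ := s)]
      simpa using (h1.trans (h2.trans h3))

theorem isortDesc_perm (vs : List Int) : (isortDesc vs).Perm vs := by
  simpa [isortDesc] using foldl_insDesc_perm vs []

theorem isortDesc_pairwise (vs : List Int) : (isortDesc vs).Pairwise (· ≥ ·) := by
  have H : ∀ (vs s : List Int), s.Pairwise (· ≥ ·) →
      (vs.foldl (fun acc x => insDesc x acc) s).Pairwise (· ≥ ·) := by
    intro vs
    induction vs with
    | nil => intro s hs; simpa using hs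
    | cons v t ih => intro s hs; exact ih _ (insDesc_pairwise v s hs)
  exact H vs [] (by simp)

theorem sorted_eq_isortDesc (vs : List Int) :
    PySem.List.sorted vs (fun x => x) true = isortDesc vs := by
  have hperm : (PySem.List.sorted vs (fun x => x) true).Perm (isortDesc vs) :=
    (PySem.List.sorted_perm vs (fun x => x) true).trans (isortDesc_perm vs).symm
  have h1 : (PySem.List.sorted vs (fun x => x) true).Pairwise (· ≥ ·) := by
    simpa using PySem.List.sorted_pairwise_rev vs (fun x => x)
  have h2 := isortDesc_pairwise vs
  exact List.Perm.eq_of_pairwise (fun a b _ _ h h' => le_antisymm h' h) h1 h2 hperm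

-- head of the kept top-3 = max? value
theorem head_eq_max (vs : List Int) (m : Int) (t : List Int)
    (hst : PySem.List.sorted vs (fun x => x) true = m :: t) :
    PySem.List.max? vs (fun x => x) = some m := by
  have hmem : m ∈ vs := by
    have := PySem.List.mem_sorted (x := m) (xs := vs) (key := fun x => x) (rev := true)
    rw [hst] at this
    exact this.mp (by simp)
  rcases hM : PySem.List.max? vs (fun x => x) with _ | M
  · rw [PySem.List.max?_eq_none_iff] at hM
    subst hM; simp at hmem
  · have hMmem := PySem.List.max?_mem hM
    have h1 : m ≤ M := PySem.List.max?_isMax hM m hmem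
    have h2 : M ≤ m := PySem.List.key_head_sorted_rev_ge vs (fun x => x) hst M hMmem
    exact congrArg some (le_antisymm h2 h1)

-- ===== VERDICT (by name: the statement is the Claim_ definition above) =====
theorem solve_spec : Claim_equal_solve := by
  intro input_content _ hpre
  unfold Spec_solve solve solve_alt
  rcases hpre with ⟨_, hne⟩
  set lines := (PySem.Str.split? input_content "\n").getD [] with hlines
  simp only [foldA, foldB, List.nil_append]
  have hvsne : psums lines 0 ≠ [] := psums_ne_nil lines 0 hne
  set vs := psums lines 0 with hvs
  have hfold : vs.foldl (fun acc x => List.take 3 (insDesc x acc)) []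
      = List.take 3 (PySem.List.sorted vs (fun x => x) true) := by
    rw [sorted_eq_isortDesc]
    simpa using foldl_take3_eq vs []
  rw [hfold]
  rcases hst : PySem.List.sorted vs (fun x => x) true with _ | ⟨m, t⟩
  · exact absurd ((PySem.List.sorted_eq_nil_iff vs (fun x => x) true).mp hst) hvsne
  · have hmax := head_eq_max vs m t hst
    have hslice : PySem.List.slice (m :: t) none (some 3) = List.take 3 (m :: t) := by
      simpa using PySem.List.slice_to (m :: t) (b := (3:Int)) (by norm_num)
    rw [hmax, hslice]
    rcases t with _ | ⟨b, u⟩ <;> simp
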